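-- pv_equiv track=rewrite | github.com/svgbogdnn/algorithms-data-structures-IDAS_course- | [CONTEST] 3 'ИСАД АиСД-1 2526. ДЗ 2. Хеш-функции'/6.py | findRotationOffset
-- ===== SOURCE A (Python) =====
-- def zalgo(t):
--     n = len(t)
--     z = [0] * n
--     l = 0
--     r = 0
--     i = 1
--     while i < n:
--         if i <= r:
--             k = i - l
--             b = r - i + 1
--             if z[k] < b:
--                 z[i] = z[k]
--             else:
--                 z[i] = b
--         while i + z[i] < n and t[z[i]] == t[i + z[i]]:
--             z[i] = z[i] + 1
--         if i + z[i] - 1 > r: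
--             l = i
--             r = i + z[i] - 1
--         i = i + 1
--     return z
--
-- def findRotationOffset(a, b):
--     if len(a) != len(b):
--         return -1
--     n = len(a)
--     if n == 0:
--         return 0
--     t = b + '#' + a + a
--     z = zalgo(t)
--     need = len(b)
--     i = need + 1
--     while i < len(t):
--         if z[i] >= need:
--             pos = i - (need + 1)
--             return pos
--         i = i + 1
--     return -1
-- ===== SOURCE B (Python) =====
-- def findRotationOffset(a, b):
--     if len(a) != len(b):
--         return -1
--     return (a + a).find(b)
-- ===== Notes on version B (the rewrite author's own statement) =====
-- stated objective: faster
-- what changed: Drops the hand-written Z-algorithm over b+'#'+a+a and its scan loop, returning (a+a).find(b) directly after the length guard: the built-in substring search yields the same first occurrence index (and -1 when absent), and ''.find('') == 0 covers the n == 0 branch.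
import Mathlib
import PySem

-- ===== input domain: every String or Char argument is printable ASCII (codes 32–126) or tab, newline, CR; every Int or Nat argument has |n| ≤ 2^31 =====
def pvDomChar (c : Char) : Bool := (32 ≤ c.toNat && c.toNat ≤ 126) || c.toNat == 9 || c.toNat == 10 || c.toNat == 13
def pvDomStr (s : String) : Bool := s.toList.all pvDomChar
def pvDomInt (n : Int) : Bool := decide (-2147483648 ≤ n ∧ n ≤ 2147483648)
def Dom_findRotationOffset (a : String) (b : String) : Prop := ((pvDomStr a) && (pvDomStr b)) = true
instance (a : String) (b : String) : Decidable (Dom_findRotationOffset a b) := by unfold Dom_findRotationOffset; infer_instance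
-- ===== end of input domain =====

-- B replaces A's Z-algorithm over b+'#'+a+a with the built-in first-occurrence search (a+a).find(b) (idiomatic; return value only, no mutation).

-- ===== PORT A =====
-- Strings are handled on .toList (exact; PySem string primitives are defined over List Char).

-- the inner 'while i + z[i] < n and t[z[i]] == t[i + z[i]]' of zalgo
def zInner (t : List Char) (i : Nat) (zi : Nat) : Nat :=
  if i + zi < t.length ∧ t[zi]? = t[i + zi]? then zInner t i (zi + 1) else zi
  termination_by t.length - (i + zi)
  decreasing_by omega

-- the outer 'while i < n' of zalgo, state (z, l, r, i)
def zLoop (t : List Char) (z : List Nat) (l r i : Nat) : List Nat :=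
  if i < t.length then
    if i + zInner t i (if i ≤ r then (if z.getD (i - l) 0 < r - i + 1 then z.getD (i - l) 0 else r - i + 1) else 0) - 1 > r then
      zLoop t (z.set i (zInner t i (if i ≤ r then (if z.getD (i - l) 0 < r - i + 1 then z.getD (i - l) 0 else r - i + 1) else 0))) i
        (i + zInner t i (if i ≤ r then (if z.getD (i - l) 0 < r - i + 1 then z.getD (i - l) 0 else r - i + 1) else 0) - 1) (i + 1)
    else
      zLoop t (z.set i (zInner t i (if i ≤ r then (if z.getD (i - l) 0 < r - i + 1 then z.getD (i - l) 0 else r - i + 1) else 0))) l r (i + 1)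
  else z
  termination_by t.length - i
  decreasing_by all_goals omega

def zalgoL (t : List Char) : List Nat := zLoop t (List.replicate t.length 0) 0 0 1

-- the final 'while i < len(t)' scan of findRotationOffset
def scanLoop (z : List Nat) (need tlen i : Nat) : Int :=
  if i < tlen then
    if need ≤ z.getD i 0 then (i : Int) - ((need : Int) + 1)
    else scanLoop z need tlen (i + 1)
  else -1
  termination_by tlen - i
  decreasing_by omega

def findRotationOffset (a : String) (b : String) : Int :=
  if a.toList.length ≠ b.toList.length then -1
  else if a.toList.length = 0 then 0
  else
    let t := b.toList ++ '#' :: (a.toList ++ a.toList)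
    let z := zalgoL t
    scanLoop z b.toList.length t.length (b.toList.length + 1)

-- ===== PORT B =====
def findRotationOffset_alt (a : String) (b : String) : Int :=
  if a.toList.length ≠ b.toList.length then -1
  else PySem.Str.find (a ++ a) b

-- ===== PRECONDITION & SPEC =====
def Spec_findRotationOffset (a : String) (b : String) (out : Int) : Prop := out = findRotationOffset_alt a b
instance (a : String) (b : String) (out : Int) : Decidable (Spec_findRotationOffset a b out) := by unfold Spec_findRotationOffset; infer_instance

-- ===== CLAIM (what is proved, stated in full; the proofs are below) =====
def Claim_equal_findRotationOffset : Prop := ∀ (a : String) (b : String), Dom_findRotationOffset a b → Spec_findRotationOffset a b (findRotationOffset a b)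

-- ===== LEMMAS AND PROOFS =====

-- longest common prefix length of two lists
def pvLcp : List Char → List Char → Nat
  | c :: s, d :: u => if c = d then pvLcp s u + 1 else 0
  | _, _ => 0

theorem pvLcp_le_right (s u : List Char) : pvLcp s u ≤ u.length := by
  induction s generalizing u with
  | nil => simp [pvLcp]
  | cons c s ih =>
    cases u with
    | nil => simp [pvLcp]
    | cons d u =>
      simp only [pvLcp]
      split
      · simpa using ih u
      · simp

theorem pvLcp_get (s u : List Char) (j : Nat) (hj : j < pvLcp s u) : s[j]? = u[j]? := by
  induction s generalizing u j with
  | nil => simp [pvLcp] at hj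
  | cons c s ih =>
    cases u with
    | nil => simp [pvLcp] at hj
    | cons d u =>
      simp only [pvLcp] at hj
      split at hj
      · cases j with
        | zero => simp_all
        | succ j => simpa using ih u j (by omega)
      · omega

theorem pvLcp_stop (s u : List Char) (h1 : pvLcp s u < s.length) (h2 : pvLcp s u < u.length) :
    s[pvLcp s u]? ≠ u[pvLcp s u]? := by
  induction s generalizing u with
  | nil => simp at h1
  | cons c s ih =>
    cases u with
    | nil => simp at h2
    | cons d u =>
      by_cases hcd : c = d
      · have h1' : pvLcp s u < s.length := by
          simp only [pvLcp, if_pos hcd, List.length_cons] at h1; omega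
        have h2' : pvLcp s u < u.length := by
          simp only [pvLcp, if_pos hcd, List.length_cons] at h2; omega
        simp only [pvLcp, if_pos hcd, List.getElem?_cons_succ]
        exact ih u h1' h2'
      · simp only [pvLcp, if_neg hcd, List.getElem?_cons_zero]
        simpa using hcd

theorem pvLcp_ge (s u : List Char) (m : Nat) (h1 : m ≤ s.length) (h2 : m ≤ u.length)
    (h3 : ∀ j < m, s[j]? = u[j]?) : m ≤ pvLcp s u := by
  by_contra h
  rw [Nat.not_le] at h
  exact pvLcp_stop s u (by omega) (by omega) (h3 _ (by omega))

-- zInner computes the exact lcp value, starting from any lower bound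
theorem zInner_eq (t : List Char) (i zi : Nat) (h : zi ≤ pvLcp t (t.drop i)) :
    zInner t i zi = pvLcp t (t.drop i) := by
  have hlen : pvLcp t (t.drop i) ≤ t.length - i := by
    simpa using pvLcp_le_right t (t.drop i)
  rcases Nat.lt_or_ge zi (pvLcp t (t.drop i)) with hlt | hge
  · have hcond : i + zi < t.length ∧ t[zi]? = t[i + zi]? := by
      refine ⟨by omega, ?_⟩
      have := pvLcp_get t (t.drop i) zi hlt
      simpa [List.getElem?_drop] using this
    rw [zInner, if_pos hcond]
    exact zInner_eq t i (zi + 1) (by omega)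
  · have hz : zi = pvLcp t (t.drop i) := by omega
    rw [zInner]
    rw [if_neg]
    · exact hz
    · rintro ⟨hb, heq⟩
      refine pvLcp_stop t (t.drop i) (by omega) (by simp; omega) ?_
      rw [← hz]
      simpa [List.getElem?_drop] using heq
  termination_by t.length - (i + zi)
  decreasing_by omega

-- invariant of the outer loop
def zInv (t : List Char) (z : List Nat) (l r i : Nat) : Prop :=
  z.length = t.length ∧ 1 ≤ i ∧
  (∀ j, 1 ≤ j → j < i → z.getD j 0 = pvLcp t (t.drop j)) ∧
  ((l = 0 ∧ r = 0) ∨ (1 ≤ l ∧ l < i ∧ r + 1 ≤ t.length ∧ r + 1 - l ≤ pvLcp t (t.drop l)))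

theorem zLoop_spec (t : List Char) (z : List Nat) (l r i : Nat) (hinv : zInv t z l r i) :
    ∀ j, 1 ≤ j → j < t.length → (zLoop t z l r i).getD j 0 = pvLcp t (t.drop j) := by
  obtain ⟨hlen, hi1, hdone, hbox⟩ := hinv
  by_cases hin : i < t.length
  · -- one step
    have hzi0 : (if i ≤ r then
        (if z.getD (i - l) 0 < r - i + 1 then z.getD (i - l) 0 else r - i + 1)
      else 0) ≤ pvLcp t (t.drop i) := by
      split <;> rename_i hir
      · -- i ≤ r : the box is nontrivial
        rcases hbox with ⟨hl0, hr0⟩ | ⟨hl1, hli, hrlen, hmatch⟩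
        · omega
        · set k := i - l with hk
          have hk1 : 1 ≤ k := by omega
          have hki : k < i := by omega
          have hzk : z.getD k 0 = pvLcp t (t.drop k) := hdone k hk1 hki
          have key : ∀ m, m ≤ pvLcp t (t.drop k) → m ≤ r - i + 1 → m ≤ pvLcp t (t.drop i) := by
            intro m hm1 hm2
            refine pvLcp_ge _ _ m (by omega) (by simp; omega) ?_
            intro j hj
            rw [List.getElem?_drop]
            have e1 : t[j]? = t[k + j]? := by
              have := pvLcp_get t (t.drop k) j (by omega)
              simpa [List.getElem?_drop] using this
            have e2 : t[k + j]? = t[i + j]? := by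
              have := pvLcp_get t (t.drop l) (k + j) (by omega)
              have e : l + (k + j) = i + j := by omega
              simpa [List.getElem?_drop, e] using this
            exact e1.trans e2
          rw [hzk]
          split <;> rename_i hcmp
          · exact key _ le_rfl (by omega)
          · exact key _ (by omega) le_rfl
      · omega
    rw [zLoop, if_pos hin]
    set zi := zInner t i (if i ≤ r then
        (if z.getD (i - l) 0 < r - i + 1 then z.getD (i - l) 0 else r - i + 1)
      else 0) with hzidef
    have hzi : zi = pvLcp t (t.drop i) := zInner_eq t i _ hzi0
    have hzile : zi ≤ t.length - i := by
      rw [hzi]; simpa using pvLcp_le_right t (t.drop i)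
    have hset : ∀ j, 1 ≤ j → j < i + 1 → (z.set i zi).getD j 0 = pvLcp t (t.drop j) := by
      intro j hj1 hj2
      rcases Nat.lt_or_ge j i with hji | hji
      · rw [List.getD, List.getElem?_set_ne (by omega)]
        exact hdone j hj1 hji
      · have hje : j = i := by omega
        subst hje
        rw [List.getD, List.getElem?_set_self (by omega), Option.getD_some]
        exact hzi
    have hlen' : (z.set i zi).length = t.length := by simpa using hlen
    by_cases hupd : i + zi - 1 > r
    · rw [if_pos hupd]
      exact zLoop_spec t _ i (i + zi - 1) (i + 1)
        ⟨hlen', by omega, hset, Or.inr ⟨by omega, by omega, by omega, by omega⟩⟩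
    · rw [if_neg hupd]
      exact zLoop_spec t _ l r (i + 1)
        ⟨hlen', by omega, hset, by
          rcases hbox with h | ⟨h1, h2, h3, h4⟩
          · exact Or.inl h
          · exact Or.inr ⟨h1, by omega, h3, h4⟩⟩
  · intro j hj1 hj2
    rw [zLoop, if_neg hin]
    exact hdone j hj1 (by omega)
  termination_by t.length - i
  decreasing_by all_goals omega

-- scan loop characterizations
theorem scanLoop_none (z : List Nat) (need tlen i : Nat)
    (h : ∀ m, i ≤ m → m < tlen → ¬ need ≤ z.getD m 0) :
    scanLoop z need tlen i = -1 := by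
  rw [scanLoop]
  split <;> rename_i hlt
  · rw [if_neg (h i le_rfl hlt)]
    exact scanLoop_none z need tlen (i + 1) (fun m h1 h2 => h m (by omega) h2)
  · rfl
  termination_by tlen - i
  decreasing_by omega

theorem scanLoop_hit (z : List Nat) (need tlen i j : Nat) (hij : i ≤ j) (hj : j < tlen)
    (hcond : need ≤ z.getD j 0) (hmin : ∀ m, i ≤ m → m < j → ¬ need ≤ z.getD m 0) :
    scanLoop z need tlen i = (j : Int) - ((need : Int) + 1) := by
  rw [scanLoop, if_pos (by omega)]
  rcases Nat.lt_or_ge i j with hlt | hge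
  · rw [if_neg (hmin i le_rfl hlt)]
    exact scanLoop_hit z need tlen (i + 1) j (by omega) hj hcond
      (fun m h1 h2 => hmin m (by omega) h2)
  · have : i = j := by omega
    subst this
    rw [if_pos hcond]
  termination_by tlen - i
  decreasing_by omega

-- drop past the pattern and separator
theorem drop_sep (bs u : List Char) (p : Nat) :
    (bs ++ '#' :: u).drop (bs.length + 1 + p) = u.drop p := by
  rw [show bs.length + 1 + p = bs.length + (1 + p) by omega, List.drop_append]
  simp [List.drop_eq_nil_of_le, show 1 + p = p + 1 by omega]

-- z[need+1+p] ≥ need ↔ b occurs at position p in a+a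
theorem match_iff (bs u : List Char) (p : Nat) :
    bs.length ≤ pvLcp (bs ++ '#' :: u) ((bs ++ '#' :: u).drop (bs.length + 1 + p)) ↔
      bs <+: u.drop p := by
  rw [drop_sep]
  set t := bs ++ '#' :: u with ht
  set v := u.drop p with hv
  constructor
  · intro h
    have hvlen : bs.length ≤ v.length :=
      le_trans h (pvLcp_le_right t v)
    rw [List.prefix_iff_eq_take]
    apply List.ext_getElem?
    intro j
    rcases Nat.lt_or_ge j bs.length with hj | hj
    · rw [List.getElem?_take_of_lt hj]
      have e1 := pvLcp_get t v j (by omega)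
      have e2 : t[j]? = bs[j]? := by
        rw [ht, List.getElem?_append_left hj]
      rw [← e1, e2]
    · rw [List.getElem?_eq_none (by simpa using hj),
          List.getElem?_eq_none (by simp; omega)]
  · intro h
    have hvlen : bs.length ≤ v.length := h.length_le
    refine pvLcp_ge t v bs.length (by simp [ht]) hvlen ?_
    intro j hj
    have e2 : t[j]? = bs[j]? := by
      rw [ht, List.getElem?_append_left hj]
    rw [e2]
    obtain ⟨rest, hrest⟩ := h
    rw [← hrest, List.getElem?_append_left hj]

-- A's scan over the z-array returns exactly the first occurrence of bs in u
theorem scan_eq_find (bs u : List Char) (hb : 1 ≤ bs.length) :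
    scanLoop (zalgoL (bs ++ '#' :: u)) bs.length (bs ++ '#' :: u).length (bs.length + 1)
      = PySem.Chars.find u bs := by
  have htlen : (bs ++ '#' :: u).length = bs.length + 1 + u.length := by simp; omega
  have hzspec : ∀ j, 1 ≤ j → j < (bs ++ '#' :: u).length →
      (zalgoL (bs ++ '#' :: u)).getD j 0 = pvLcp (bs ++ '#' :: u) ((bs ++ '#' :: u).drop j) := by
    unfold zalgoL
    exact zLoop_spec _ _ 0 0 1
      ⟨by simp, le_rfl, fun j h1 h2 => absurd h2 (by omega), Or.inl ⟨rfl, rfl⟩⟩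
  rcases Int.lt_or_le (PySem.Chars.find u bs) 0 with hneg | hpos
  · have hfm1 : PySem.Chars.find u bs = -1 := by
      have := PySem.Chars.neg_one_le_find u bs; omega
    rw [hfm1]
    apply scanLoop_none
    intro m hm1 hm2
    rw [hzspec m (by omega) hm2,
        show m = bs.length + 1 + (m - (bs.length + 1)) by omega, match_iff]
    intro hpre
    have hinf : bs <:+: u := by
      rw [← PySem.Chars.isIn_iff_infix, ← PySem.Chars.exists_prefix_drop_iff_isIn]
      exact ⟨_, hpre⟩
    exact (PySem.Chars.find_eq_neg_one_iff u bs).mp hfm1 hinf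
  · obtain ⟨hpre, hmin⟩ := PySem.Chars.find_spec hpos
    have hklen : (PySem.Chars.find u bs).toNat + bs.length ≤ u.length := by
      have := hpre.length_le
      simp only [List.length_drop] at this
      omega
    have hc : bs.length ≤ (zalgoL (bs ++ '#' :: u)).getD
        (bs.length + 1 + (PySem.Chars.find u bs).toNat) 0 := by
      rw [hzspec _ (by omega) (by omega), match_iff]
      exact hpre
    have hm : ∀ m, bs.length + 1 ≤ m → m < bs.length + 1 + (PySem.Chars.find u bs).toNat →
        ¬ bs.length ≤ (zalgoL (bs ++ '#' :: u)).getD m 0 := by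
      intro m h1 h2
      rw [hzspec m (by omega) (by omega),
          show m = bs.length + 1 + (m - (bs.length + 1)) by omega, match_iff]
      exact hmin _ (by omega)
    rw [scanLoop_hit _ _ _ _ _ (by omega) (by omega) hc hm]
    push_cast
    omega

-- ===== VERDICT (by name: the statement is the Claim_ definition above) =====
theorem findRotationOffset_spec : Claim_equal_findRotationOffset := by
  intro a b _
  unfold Spec_findRotationOffset findRotationOffset findRotationOffset_alt
  split_ifs with hne h0
  · rfl
  · have hne' : a.toList.length = b.toList.length := by omega
    have ha : a.toList = [] := List.length_eq_zero_iff.mp h0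
    have hb : b.toList = [] := List.length_eq_zero_iff.mp (by omega)
    rw [PySem.Str.find_eq, String.toList_append, ha, hb]
    exact (PySem.Chars.find_nil _).symm
  · show scanLoop (zalgoL (b.toList ++ '#' :: (a.toList ++ a.toList))) b.toList.length
          (b.toList ++ '#' :: (a.toList ++ a.toList)).length (b.toList.length + 1)
        = PySem.Str.find (a ++ a) b
    rw [PySem.Str.find_eq, String.toList_append]
    exact scan_eq_find b.toList (a.toList ++ a.toList) (by omega)
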